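-- pv_equiv track=rewrite | github.com/lonelywolf1981/AdventToCode | 2019/day22/solution.py | repeat_shuffle
-- ===== SOURCE A (Python) =====
-- def repeat_shuffle(a, b, M, k):
--     # Используем бинарную экспоненту
--     A = 1
--     B = 0
--
--     while k > 0:
--         if (k & 1) != 0:
--             # A,B = compose(A,B with a,b)
--             A = (A * a) % M
--             B = (B * a + b) % M
--
--         # Составляем (a,b) с самим собой
--         b_new = (b * (a + 1)) % M if a == 1 else (b * (a + 1)) % M
--
--         # Правильно: f(f(x)) = a*(a*x+b) + b = a^2 x + (a*b + b)
--         b_new = (a * b + b) % M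
--         a_new = (a * a) % M
--
--         a, b = a_new, b_new
--         k >>= 1
--
--     return A, B
-- ===== SOURCE B (Python) =====
-- def repeat_shuffle(a, b, M, k):
--     # Recursive divide-and-conquer exponentiation of the affine map x -> a*x + b (mod M).
--     if k <= 0:
--         return (1, 0)
--     A, B = repeat_shuffle(a, b, M, k // 2)
--     A, B = (A * A) % M, (A * B + B) % M
--     if k % 2 == 1:
--         A, B = (A * a) % M, (B * a + b) % M
--     return (A, B)
-- ===== Notes on version B (the rewrite author's own statement) =====
-- stated objective: alternative
-- what changed: Replaces the iterative bit-scan loop that maintains an accumulator and repeatedly squares the base with a recursive divide-and-conquer exponentiation: recurse on k//2, square the result, and compose once more with (a,b) when k is odd.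
import Mathlib
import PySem

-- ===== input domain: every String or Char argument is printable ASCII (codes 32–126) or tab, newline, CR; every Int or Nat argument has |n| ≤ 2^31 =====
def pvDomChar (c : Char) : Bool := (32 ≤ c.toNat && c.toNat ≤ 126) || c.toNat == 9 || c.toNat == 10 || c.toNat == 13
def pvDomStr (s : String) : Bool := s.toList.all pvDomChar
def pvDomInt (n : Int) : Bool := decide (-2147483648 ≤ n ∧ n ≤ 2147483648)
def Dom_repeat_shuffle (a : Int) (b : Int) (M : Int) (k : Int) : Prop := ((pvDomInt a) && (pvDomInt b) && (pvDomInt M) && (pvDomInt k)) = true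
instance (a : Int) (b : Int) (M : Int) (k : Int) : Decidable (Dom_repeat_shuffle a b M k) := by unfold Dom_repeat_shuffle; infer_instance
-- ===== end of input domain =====

-- B replaces A's iterative bit-scan binary exponentiation (accumulator + repeated squaring of the
-- base) by a recursive divide-and-conquer exponentiation on k//2; same number of modular steps, different decomposition.

-- needed by pvLoopA's termination proof (Python's k >> 1 is Lean's >>>; it is floor division by 2)
theorem pvShiftRight_one (k : Int) : k >>> (1:Nat) = PySem.Int.floordiv k 2 := by
  rw [Int.shiftRight_eq_div_pow, PySem.Int.floordiv_eq_ediv_of_pos (by norm_num)]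
  norm_num

-- ===== PORT A =====
-- the while-loop of A: state (a, b, k, A, B); M is fixed
def pvLoopA (M : Int) (a b k A B : Int) : Int × Int :=
  if 0 < k then
    let A' := if PySem.Int.band k 1 ≠ 0 then PySem.Int.mod (A * a) M else A
    let B' := if PySem.Int.band k 1 ≠ 0 then PySem.Int.mod (B * a + b) M else B
    -- dead first assignment to b_new in A (immediately overwritten), kept literally
    let _bNew1 := if a = 1 then PySem.Int.mod (b * (a + 1)) M else PySem.Int.mod (b * (a + 1)) M
    let bNew := PySem.Int.mod (a * b + b) M
    let aNew := PySem.Int.mod (a * a) M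
    pvLoopA M aNew bNew (k >>> (1:Nat)) A' B'
  else (A, B)
termination_by k.toNat
decreasing_by
  rw [pvShiftRight_one, PySem.Int.floordiv_eq_ediv_of_pos (by norm_num)]
  omega

def repeat_shuffle (a : Int) (b : Int) (M : Int) (k : Int) : Int × Int :=
  pvLoopA M a b k 1 0

-- ===== PORT B =====
def pvPowB (M : Int) (a b k : Int) : Int × Int :=
  if k ≤ 0 then (1, 0)
  else
    let P := pvPowB M a b (PySem.Int.floordiv k 2)
    let A2 := PySem.Int.mod (P.1 * P.1) M
    let B2 := PySem.Int.mod (P.1 * P.2 + P.2) M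
    if PySem.Int.mod k 2 = 1 then (PySem.Int.mod (A2 * a) M, PySem.Int.mod (B2 * a + b) M)
    else (A2, B2)
termination_by k.toNat
decreasing_by
  rw [PySem.Int.floordiv_eq_ediv_of_pos (by norm_num)]
  omega

def repeat_shuffle_alt (a : Int) (b : Int) (M : Int) (k : Int) : Int × Int :=
  pvPowB M a b k

-- ===== PRECONDITION & SPEC =====
-- Pre_ excludes only M = 0 with k > 0, where Python's `% M` raises ZeroDivisionError in both programs.
def Pre_repeat_shuffle (a : Int) (b : Int) (M : Int) (k : Int) : Prop := 0 < k → M ≠ 0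
instance (a : Int) (b : Int) (M : Int) (k : Int) : Decidable (Pre_repeat_shuffle a b M k) := by unfold Pre_repeat_shuffle; infer_instance
def pvWitness_repeat_shuffle : Int × Int × Int × Int := (3, 5, 10, 4)

def Spec_repeat_shuffle (a : Int) (b : Int) (M : Int) (k : Int) (out : Int × Int) : Prop := out = repeat_shuffle_alt a b M k
instance (a : Int) (b : Int) (M : Int) (k : Int) (out : Int × Int) : Decidable (Spec_repeat_shuffle a b M k out) := by unfold Spec_repeat_shuffle; infer_instance

-- ===== CLAIM (what is proved, stated in full; the proofs are below) =====
def Claim_equal_repeat_shuffle : Prop := ∀ (a : Int) (b : Int) (M : Int) (k : Int), Dom_repeat_shuffle a b M k → Pre_repeat_shuffle a b M k → Spec_repeat_shuffle a b M k (repeat_shuffle a b M k)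

-- ===== LEMMAS AND PROOFS =====

-- Python-mod congruence toolkit
theorem pvModDvd (x M : Int) : M ∣ x - PySem.Int.mod x M :=
  ⟨PySem.Int.floordiv x M, by linear_combination -PySem.Int.floordiv_mul_add_mod x M⟩

theorem pvModEq (x M : Int) : Int.ModEq M (PySem.Int.mod x M) x :=
  Int.modEq_iff_dvd.mpr (pvModDvd x M)

theorem pvModCongr {M x y : Int} (hM : M ≠ 0) (h : Int.ModEq M x y) :
    PySem.Int.mod x M = PySem.Int.mod y M := by
  obtain ⟨c1, e1⟩ := pvModDvd x M
  obtain ⟨c2, e2⟩ := pvModDvd y M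
  obtain ⟨c3, e3⟩ := Int.ModEq.dvd h
  have hd : PySem.Int.mod x M - PySem.Int.mod y M = M * (c2 - c1 - c3) := by
    linear_combination -e1 + e2 - e3
  rcases lt_or_gt_of_ne hM with hneg | hpos
  · obtain ⟨hb1, hb2⟩ := PySem.Int.mod_neg_bounds (a := x) hneg
    obtain ⟨hb3, hb4⟩ := PySem.Int.mod_neg_bounds (a := y) hneg
    have hz : M * (c2 - c1 - c3) = 0 := by
      rcases lt_trichotomy (c2 - c1 - c3) 0 with hc | hc | hc
      · nlinarith
      · rw [hc, mul_zero]
      · nlinarith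
    omega
  · have hb1 := PySem.Int.mod_nonneg (a := x) hpos
    have hb2 := PySem.Int.mod_lt (a := x) hpos
    have hb3 := PySem.Int.mod_nonneg (a := y) hpos
    have hb4 := PySem.Int.mod_lt (a := y) hpos
    have hz : M * (c2 - c1 - c3) = 0 := by
      rcases lt_trichotomy (c2 - c1 - c3) 0 with hc | hc | hc
      · nlinarith
      · rw [hc, mul_zero]
      · nlinarith
    omega

-- geometric sum Σ_{i<n} a^i
def pvS (a : Int) (n : Nat) : Int := ∑ i ∈ Finset.range n, a ^ i

theorem pvS_one (a : Int) : pvS a 1 = 1 := by simp [pvS]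

theorem pvS_succ (a : Int) (n : Nat) : pvS a (n + 1) = pvS a n + a ^ n :=
  Finset.sum_range_succ _ n

theorem pvS_succ' (a : Int) (n : Nat) : pvS a (n + 1) = a * pvS a n + 1 :=
  geom_sum_succ

theorem pvS_modEq {M x y : Int} (h : Int.ModEq M x y) (n : Nat) :
    Int.ModEq M (pvS x n) (pvS y n) := by
  induction n with
  | zero => rfl
  | succ n ih => rw [pvS_succ, pvS_succ]; exact ih.add (h.pow n)

theorem pvSq_pow (a : Int) (m : Nat) : (a * a) ^ m = a ^ (2 * m) := by
  rw [← sq, ← pow_mul]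

theorem pvS_two_mul (a : Int) (m : Nat) : pvS a (2 * m) = (a + 1) * pvS (a * a) m := by
  induction m with
  | zero => simp [pvS]
  | succ m ih =>
    have h1 : 2 * (m + 1) = (2 * m + 1) + 1 := by omega
    rw [h1, pvS_succ, pvS_succ, pvS_succ, ih, pvSq_pow]
    rw [pow_succ]
    ring

-- closed form of B's recursion for k > 0
theorem pvPowB_closed (n : Nat) : ∀ (a b M k : Int), M ≠ 0 → 0 < k → k.toNat = n →
    pvPowB M a b k = (PySem.Int.mod (a ^ k.toNat) M, PySem.Int.mod (b * pvS a k.toNat) M) := by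
  induction n using Nat.strong_induction_on with
  | _ n ih =>
    intro a b M k hM hk hn
    have hm2 := PySem.Int.floordiv_mul_add_mod k 2
    have hr0 := PySem.Int.mod_nonneg (a := k) (b := 2) (by norm_num)
    have hr1 := PySem.Int.mod_lt (a := k) (b := 2) (by norm_num)
    set m := PySem.Int.floordiv k 2 with hmdef
    rw [pvPowB, if_neg (by omega)]
    by_cases hm : 0 < m
    · have hmn : m.toNat < n := by omega
      rw [ih m.toNat hmn a b M m hM hm rfl]
      have hpow : (a ^ m.toNat) * (a ^ m.toNat) = a ^ (2 * m.toNat) := by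
        rw [← pow_add]; congr 1; omega
      have hA2 : PySem.Int.mod (PySem.Int.mod (a ^ m.toNat) M * PySem.Int.mod (a ^ m.toNat) M) M
          = PySem.Int.mod (a ^ (2 * m.toNat)) M := by
        apply pvModCongr hM
        rw [← hpow]
        exact (pvModEq _ M).mul (pvModEq _ M)
      have hS : a ^ m.toNat * pvS a m.toNat + pvS a m.toNat = pvS a (2 * m.toNat) := by
        have h2 : 2 * m.toNat = m.toNat + m.toNat := by omega
        rw [h2]
        simp only [pvS, Finset.sum_range_add (fun i => a ^ i) m.toNat m.toNat, pow_add]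
        rw [← Finset.mul_sum]
        ring
      have hB2 : PySem.Int.mod (PySem.Int.mod (a ^ m.toNat) M * PySem.Int.mod (b * pvS a m.toNat) M
            + PySem.Int.mod (b * pvS a m.toNat) M) M
          = PySem.Int.mod (b * pvS a (2 * m.toNat)) M := by
        apply pvModCongr hM
        have h1 : Int.ModEq M (PySem.Int.mod (a ^ m.toNat) M * PySem.Int.mod (b * pvS a m.toNat) M
            + PySem.Int.mod (b * pvS a m.toNat) M) (a ^ m.toNat * (b * pvS a m.toNat) + b * pvS a m.toNat) :=
          ((pvModEq _ M).mul (pvModEq _ M)).add (pvModEq _ M)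
        have h2 : a ^ m.toNat * (b * pvS a m.toNat) + b * pvS a m.toNat = b * pvS a (2 * m.toNat) := by
          rw [← hS]; ring
        rwa [h2] at h1
      by_cases hpar : PySem.Int.mod k 2 = 1
      · rw [if_pos hpar]
        have hkn1 : k.toNat = 2 * m.toNat + 1 := by omega
        rw [hA2, hB2, hkn1]
        congr 1
        · apply pvModCongr hM
          have h1 : Int.ModEq M (PySem.Int.mod (a ^ (2 * m.toNat)) M * a) (a ^ (2 * m.toNat) * a) :=
            (pvModEq _ M).mul_right a
          rwa [← pow_succ] at h1
        · apply pvModCongr hM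
          have h1 : Int.ModEq M (PySem.Int.mod (b * pvS a (2 * m.toNat)) M * a + b)
              (b * pvS a (2 * m.toNat) * a + b) := ((pvModEq _ M).mul_right a).add_right b
          have h2 : b * pvS a (2 * m.toNat) * a + b = b * pvS a (2 * m.toNat + 1) := by
            rw [pvS_succ']; ring
          rwa [h2] at h1
      · rw [if_neg hpar]
        have hkn0 : k.toNat = 2 * m.toNat := by omega
        rw [hA2, hB2, hkn0]
    · -- k = 1: the recursive call is at floordiv 1 2 = 0
      have hk1 : k = 1 := by omega
      subst hk1
      have hrec : pvPowB M a b (PySem.Int.floordiv (1:Int) 2) = (1, 0) := by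
        rw [show PySem.Int.floordiv (1:Int) 2 = 0 by decide, pvPowB]
        simp
      rw [hrec]
      show (PySem.Int.mod (PySem.Int.mod ((1:Int) * 1) M * a) M,
          PySem.Int.mod (PySem.Int.mod ((1:Int) * 0 + 0) M * a + b) M) = _
      congr 1
      · apply pvModCongr hM
        have h1 : Int.ModEq M (PySem.Int.mod ((1:Int) * 1) M * a) ((1:Int) * 1 * a) :=
          (pvModEq _ M).mul_right a
        have h2 : (1:Int) * 1 * a = a ^ Int.toNat (1:Int) := by norm_num
        rwa [h2] at h1
      · apply pvModCongr hM
        have h1 : Int.ModEq M (PySem.Int.mod ((1:Int) * 0 + 0) M * a + b)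
            (((1:Int) * 0 + 0) * a + b) := ((pvModEq _ M).mul_right a).add_right b
        have h2 : ((1:Int) * 0 + 0) * a + b = b * pvS a (Int.toNat (1:Int)) := by
          rw [show Int.toNat (1:Int) = 1 from rfl, pvS_one]; ring
        rwa [h2] at h1

-- invariant of A's loop for k > 0
theorem pvLoopA_zero (M a b A B : Int) : pvLoopA M a b 0 A B = (A, B) := by
  rw [pvLoopA, if_neg (by norm_num)]

theorem pvLoopA_closed (n : Nat) : ∀ (a b A B M k : Int), M ≠ 0 → 0 < k → k.toNat = n →
    pvLoopA M a b k A B = (PySem.Int.mod (A * a ^ k.toNat) M,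
      PySem.Int.mod (B * a ^ k.toNat + b * pvS a k.toNat) M) := by
  induction n using Nat.strong_induction_on with
  | _ n ih =>
    intro a b A B M k hM hk hn
    have hm2 := PySem.Int.floordiv_mul_add_mod k 2
    have hr0 := PySem.Int.mod_nonneg (a := k) (b := 2) (by norm_num)
    have hr1 := PySem.Int.mod_lt (a := k) (b := 2) (by norm_num)
    set m := PySem.Int.floordiv k 2 with hmdef
    rw [pvLoopA, if_pos hk, PySem.Int.band_one, pvShiftRight_one, ← hmdef]
    by_cases hpar : PySem.Int.mod k 2 = 1
    · rw [hpar, if_pos (show (1:Int) ≠ 0 by norm_num), if_pos (show (1:Int) ≠ 0 by norm_num)]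
      by_cases hm : 0 < m
      · rw [ih m.toNat (by omega) _ _ _ _ M m hM hm rfl]
        have hkn : k.toNat = 2 * m.toNat + 1 := by omega
        rw [hkn]
        congr 1
        · apply pvModCongr hM
          have h1 : Int.ModEq M (PySem.Int.mod (A * a) M * PySem.Int.mod (a * a) M ^ m.toNat)
              ((A * a) * (a * a) ^ m.toNat) :=
            (pvModEq _ M).mul ((pvModEq _ M).pow m.toNat)
          have h2 : (A * a) * (a * a) ^ m.toNat = A * a ^ (2 * m.toNat + 1) := by
            rw [pvSq_pow, pow_succ]; ring
          rwa [h2] at h1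
        · apply pvModCongr hM
          have h1 : Int.ModEq M (PySem.Int.mod (B * a + b) M * PySem.Int.mod (a * a) M ^ m.toNat
                + PySem.Int.mod (a * b + b) M * pvS (PySem.Int.mod (a * a) M) m.toNat)
              ((B * a + b) * (a * a) ^ m.toNat + (a * b + b) * pvS (a * a) m.toNat) :=
            ((pvModEq _ M).mul ((pvModEq _ M).pow m.toNat)).add
              ((pvModEq _ M).mul (pvS_modEq (pvModEq _ M) m.toNat))
          have h2 : (B * a + b) * (a * a) ^ m.toNat + (a * b + b) * pvS (a * a) m.toNat
              = B * a ^ (2 * m.toNat + 1) + b * pvS a (2 * m.toNat + 1) := by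
            rw [pvS_succ, pvS_two_mul, pvSq_pow, pow_succ]; ring
          rwa [h2] at h1
      · -- m = 0, so k = 1: the recursive call returns the accumulator unchanged
        have hm0 : m = 0 := by omega
        have hkn : k.toNat = 1 := by omega
        rw [hm0, pvLoopA_zero, hkn]
        congr 1
        · rw [pow_one]
        · rw [pow_one, pvS_one, mul_one]
    · have hpar0 : PySem.Int.mod k 2 = 0 := by omega
      have hm : 0 < m := by omega
      rw [hpar0, if_neg (show ¬ (0:Int) ≠ 0 by norm_num), if_neg (show ¬ (0:Int) ≠ 0 by norm_num)]
      rw [ih m.toNat (by omega) _ _ _ _ M m hM hm rfl]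
      have hkn : k.toNat = 2 * m.toNat := by omega
      rw [hkn]
      congr 1
      · apply pvModCongr hM
        have h1 : Int.ModEq M (A * PySem.Int.mod (a * a) M ^ m.toNat) (A * (a * a) ^ m.toNat) :=
          Int.ModEq.mul_left A ((pvModEq _ M).pow m.toNat)
        have h2 : A * (a * a) ^ m.toNat = A * a ^ (2 * m.toNat) := by rw [pvSq_pow]
        rwa [h2] at h1
      · apply pvModCongr hM
        have h1 : Int.ModEq M (B * PySem.Int.mod (a * a) M ^ m.toNat
              + PySem.Int.mod (a * b + b) M * pvS (PySem.Int.mod (a * a) M) m.toNat)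
            (B * (a * a) ^ m.toNat + (a * b + b) * pvS (a * a) m.toNat) :=
          (Int.ModEq.mul_left B ((pvModEq _ M).pow m.toNat)).add
            ((pvModEq _ M).mul (pvS_modEq (pvModEq _ M) m.toNat))
        have h2 : B * (a * a) ^ m.toNat + (a * b + b) * pvS (a * a) m.toNat
            = B * a ^ (2 * m.toNat) + b * pvS a (2 * m.toNat) := by
          rw [pvS_two_mul, pvSq_pow]; ring
        rwa [h2] at h1

-- ===== VERDICT (by name: the statement is the Claim_ definition above) =====
theorem repeat_shuffle_spec : Claim_equal_repeat_shuffle := by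
  intro a b M k _hDom hPre
  unfold Spec_repeat_shuffle repeat_shuffle repeat_shuffle_alt
  by_cases hk : 0 < k
  · have hM := hPre hk
    rw [pvLoopA_closed k.toNat a b 1 0 M k hM hk rfl,
        pvPowB_closed k.toNat a b M k hM hk rfl]
    simp
  · rw [pvLoopA, if_neg hk, pvPowB, if_pos (by omega)]
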